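-- pv_equiv track=rewrite | github.com/liamchristopher/worship_the_dot | dot/poetry.py | banner
-- ===== SOURCE A (Python) =====
-- def banner(width: int = 21) -> str:
--     """Return an ASCII banner that centers THE DOT.
--
--     Produces a red dot motif without ANSI codes so it's portable.
--     Width is clamped to an odd number >= 7 for symmetry.
--     """
--     w = max(7, width)
--     if w % 2 == 0:
--         w += 1
--     center = w // 2
--     rows = []
--     for r in range(w):
--         row = [" "] * w
--         # Draw a circular dot by Manhattan distance threshold
--         for c in range(w):
--             if abs(c - center) + abs(r - center) <= center // 2:
--                 row[c] = "●"  # solid dot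
--         rows.append("".join(row))
--     title = " THE DOT "
--     pad = max(0, (w - len(title)) // 2)
--     header = "=" * w
--     return "\n".join([header, " " * pad + title, header] + rows) + "\n"
-- ===== SOURCE B (Python) =====
-- def banner(width: int = 21) -> str:
--     """ASCII banner centering THE DOT: only the top half of the diamond is
--     computed (arithmetic spans), the bottom half is its mirror image."""
--     w = max(7, width)
--     w += 1 - w % 2
--     center = w // 2
--
--     def span(r):
--         hw = center // 2 - abs(r - center)
--         if hw < 0:
--             return " " * w
--         return " " * (center - hw) + "●" * (2 * hw + 1) + " " * (center - hw)
--
--     top = [span(r) for r in range(center + 1)]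
--     rows = top + top[:-1][::-1]
--     title = " THE DOT "
--     header = "=" * w
--     lines = [header, " " * max(0, (w - len(title)) // 2) + title, header] + rows
--     return "".join(line + "\n" for line in lines)
-- ===== Notes on version B (the rewrite author's own statement) =====
-- stated objective: simpler
-- what changed: A's per-cell O(w^2) scan (mutating a [' ']*w list at every hit of the Manhattan test) is replaced by computing only the TOP HALF of the diamond as arithmetic rows (blank prefix / dot run / blank suffix) and mirroring it for the bottom half, assembling the output as ''.join(line+'\n') instead of '\n'.join(...)+'\n'.
import Mathlib
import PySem

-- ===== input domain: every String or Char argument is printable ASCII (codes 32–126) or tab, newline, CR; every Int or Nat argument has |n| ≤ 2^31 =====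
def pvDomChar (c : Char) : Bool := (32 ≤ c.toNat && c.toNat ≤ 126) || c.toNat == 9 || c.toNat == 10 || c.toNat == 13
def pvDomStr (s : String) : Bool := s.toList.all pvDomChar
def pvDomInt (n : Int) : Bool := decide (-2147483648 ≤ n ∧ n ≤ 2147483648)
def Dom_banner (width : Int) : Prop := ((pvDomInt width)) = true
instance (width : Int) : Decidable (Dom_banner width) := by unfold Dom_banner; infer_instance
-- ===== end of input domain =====

-- B computes only the top half of the diamond as arithmetic spans and mirrors it,
-- instead of A's per-cell scan of every row; the outer banner text is identical.


-- ===== PORT A =====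
-- one row of A: row = [" "] * w; for c in range(w): if abs(c-center)+abs(r-center) <= center//2: row[c] = "●"; "".join(row)
-- (row[c] = "●" is ported as List.set c.toNat: 0 ≤ c < w always holds for c from range(w), so it is exact)
def bannerRowA (w center r : Int) : String :=
  let row := PySem.List.pyRepeat [" "] w
  let row := (PySem.List.pyRange 0 w 1).foldl (fun row c =>
      if (((c - center).natAbs : Int) + ((r - center).natAbs : Int) ≤ PySem.Int.floordiv center 2)
      then row.set c.toNat "●" else row) row
  PySem.Str.join "" row

def banner (width : Int) : String :=
  let w := max 7 width
  let w := if PySem.Int.mod w 2 == 0 then w + 1 else w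
  let center := PySem.Int.floordiv w 2
  let rows := (PySem.List.pyRange 0 w 1).foldl (fun rows r => rows ++ [bannerRowA w center r]) ([] : List String)
  let title := " THE DOT "
  let pad := max 0 (PySem.Int.floordiv (w - (PySem.Str.len title : Int)) 2)
  let header := String.ofList (List.replicate w.toNat '=')   -- "=" * w (0 ≤ w here, exact)
  PySem.Str.join "\n" ([header, String.ofList (List.replicate pad.toNat ' ') ++ title, header] ++ rows) ++ "\n"

-- ===== PORT B =====
-- span(r): blank prefix / dot run / blank suffix by arithmetic
-- ('" " * k' and string concatenation are ported on char lists via String.ofList; exact for these ASCII/dot literals)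
def bannerSpan (w center r : Int) : String :=
  let hw := PySem.Int.floordiv center 2 - ((r - center).natAbs : Int)
  if hw < 0 then String.ofList (List.replicate w.toNat ' ')
  else String.ofList (List.replicate (center - hw).toNat ' ' ++ List.replicate (2 * hw + 1).toNat '●'
        ++ List.replicate (center - hw).toNat ' ')

def banner_alt (width : Int) : String :=
  let w := max 7 width
  let w := w + (1 - PySem.Int.mod w 2)
  let center := PySem.Int.floordiv w 2
  let top := (PySem.List.pyRange 0 (center + 1) 1).map (bannerSpan w center)
  -- top[:-1][::-1]: PySem.List.slice … (some (-1)) then .reverse (slice?_none_none_neg_one: [::-1] IS reverse)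
  let rows := top ++ (PySem.List.slice top none (some (-1))).reverse
  let title := " THE DOT "
  let header := String.ofList (List.replicate w.toNat '=')
  let lines := [header, String.ofList (List.replicate (max 0 (PySem.Int.floordiv (w - (PySem.Str.len title : Int)) 2)).toNat ' ') ++ title, header] ++ rows
  PySem.Str.join "" (lines.map (fun line => line ++ "\n"))

-- ===== PRECONDITION & SPEC =====
def Spec_banner (width : Int) (out : String) : Prop := out = banner_alt width
instance (width : Int) (out : String) : Decidable (Spec_banner width out) := by unfold Spec_banner; infer_instance

-- ===== CLAIM (what is proved, stated in full; the proofs are below) =====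
def Claim_equal_banner : Prop := ∀ (width : Int), Dom_banner width → Spec_banner width (banner width)

-- ===== LEMMAS AND PROOFS =====

-- the fold of conditional assignments row[c] = v over range(n): element j ends up v iff j is hit
theorem getElem?_foldl_set {α : Type} (p : Int → Prop) [DecidablePred p] (v : α) :
    ∀ (cs : List Int) (row : List α) (j : Nat), (∀ c ∈ cs, 0 ≤ c) →
    (cs.foldl (fun row c => if p c then row.set c.toNat v else row) row)[j]? =
      if (j : Int) ∈ cs ∧ p j then (if j < row.length then some v else none) else row[j]?
  | [], row, j, _ => by simp
  | c :: cs, row, j, hnn => by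
    have hc0 : 0 ≤ c := hnn c (List.mem_cons_self ..)
    have hlen : (if p c then row.set c.toNat v else row).length = row.length := by
      split <;> simp
    rw [List.foldl_cons, getElem?_foldl_set p v cs _ j (fun x hx => hnn x (List.mem_cons_of_mem _ hx)), hlen]
    by_cases hA : (j : Int) ∈ cs ∧ p (j : Int)
    · conv_lhs => rw [if_pos hA]
      conv_rhs => rw [if_pos (⟨List.mem_cons_of_mem _ hA.1, hA.2⟩ :
        (j : Int) ∈ c :: cs ∧ p (j : Int))]
    · conv_lhs => rw [if_neg hA]
      by_cases hB : (j : Int) ∈ c :: cs ∧ p (j : Int)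
      · have hcj : c = (j : Int) := by
          rcases List.mem_cons.1 hB.1 with h | h
          · exact h.symm
          · exact absurd ⟨h, hB.2⟩ hA
        conv_rhs => rw [if_pos hB]
        have hpc : p c := hcj ▸ hB.2
        conv_lhs => rw [if_pos hpc]
        rw [List.getElem?_set]
        conv_lhs => rw [if_pos (show c.toNat = j by omega)]
        rw [show c.toNat = j by omega]
      · conv_rhs => rw [if_neg hB]
        by_cases hpc : p c
        · conv_lhs => rw [if_pos hpc]
          rw [List.getElem?_set]
          have hne : ¬ c.toNat = j := by
            intro h
            exact hB ⟨List.mem_cons.2 (Or.inl (by omega)), by rwa [show (j : Int) = c by omega]⟩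
          conv_lhs => rw [if_neg hne]
        · conv_lhs => rw [if_neg hpc]

-- A's inner loop over a fresh [" "]*n row IS the pointwise indicator list
theorem foldl_set_eq_map {α : Type} (n : Nat) (p : Int → Prop) [DecidablePred p] (v d : α) :
    ((PySem.List.pyRange 0 (n : Int) 1).foldl
        (fun row c => if p c then row.set c.toNat v else row) (List.replicate n d))
      = (PySem.List.pyRange 0 (n : Int) 1).map (fun c => if p c then v else d) := by
  apply List.ext_getElem?
  intro j
  rw [getElem?_foldl_set p v _ _ j (by
    intro c hc
    have := (PySem.List.mem_pyRange_one (a := 0) (b := (n : Int)) (x := c)).1 hc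
    omega)]
  have hmem : ((j : Int) ∈ PySem.List.pyRange 0 (n : Int) 1) ↔ j < n := by
    rw [PySem.List.mem_pyRange_one]; omega
  by_cases hj : j < n
  · rw [PySem.List.getElem?_map_pyRange_zero _ _ _ hj]
    by_cases hp : p (j : Int)
    · conv_lhs => rw [if_pos ⟨hmem.2 hj, hp⟩, if_pos (show j < (List.replicate n d).length by simpa using hj)]
      rw [if_pos hp]
    · conv_lhs => rw [if_neg (fun h => hp h.2)]
      rw [List.getElem?_replicate, if_pos hj, if_neg hp]
  · conv_lhs => rw [if_neg (fun h => hj (hmem.1 h.1))]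
    rw [List.getElem?_replicate, if_neg hj, List.getElem?_eq_none]
    simp [PySem.List.length_pyRange_one]
    omega

-- the scanned row of A equals the arithmetic span row of B (for an odd width w = 2*center+1)
theorem row_eq (w center r : Int) (hw : w = 2 * center + 1) (hc : 0 ≤ center) :
    bannerRowA w center r = bannerSpan w center r := by
  have hq := PySem.Int.floordiv_mul_add_mod center 2
  have hq0 := PySem.Int.mod_nonneg center (by omega : (0:Int) < 2)
  have hq1 := PySem.Int.mod_lt center (by omega : (0:Int) < 2)
  obtain ⟨n, rfl⟩ : ∃ n : Nat, w = (n : Int) := ⟨w.toNat, by omega⟩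
  apply String.toList_inj.mp
  unfold bannerRowA bannerSpan
  dsimp only
  rw [PySem.List.pyRepeat_singleton, Int.toNat_natCast, foldl_set_eq_map]
  set q := PySem.Int.floordiv center 2 with hqdef
  set d : Int := ((r - center).natAbs : Int) with hddef
  have hd0 : 0 ≤ d := by omega
  have hmapl : (PySem.Str.join ""
      ((PySem.List.pyRange 0 (n : Int) 1).map (fun c => if ((c - center).natAbs : Int) + d ≤ q then "●" else " "))).toList
      = (PySem.List.pyRange 0 (n : Int) 1).map (fun c => if ((c - center).natAbs : Int) + d ≤ q then '●' else ' ') := by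
    rw [PySem.Str.toList_join]
    rw [List.map_map]
    have h1 : (String.toList ∘ fun c => if ((c - center).natAbs : Int) + d ≤ q then "●" else " ")
        = (fun ch => [ch]) ∘ (fun c : Int => if ((c - center).natAbs : Int) + d ≤ q then '●' else ' ') := by
      funext c
      simp only [Function.comp_apply]
      split <;> rfl
    rw [h1, ← List.map_map]
    exact PySem.Chars.join_nil_singletons _
  rw [hmapl]
  by_cases hneg : q - d < 0
  · rw [if_pos hneg]
    simp only [String.toList_ofList]
    apply List.ext_getElem
    · simp [PySem.List.length_pyRange_one]
    · intro j h1 h2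
      rw [List.getElem_map, PySem.List.getElem_pyRange_one, List.getElem_replicate]
      rw [if_neg (by simp at h1; omega)]
  · rw [if_neg hneg]
    simp only [String.toList_ofList]
    apply List.ext_getElem
    · simp [PySem.List.length_pyRange_one]
      omega
    · intro j h1 h2
      rw [List.getElem_map, PySem.List.getElem_pyRange_one]
      simp only at h1
      simp only [List.getElem_append, List.getElem_replicate, List.length_append,
        List.length_replicate, zero_add]
      split_ifs <;> first | rfl | omega

-- mirroring the top half of a symmetric row function reproduces the full range of rows
theorem rows_mirror (c : Int) (hc : 0 ≤ c) (f : Int → String)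
    (hsym : ∀ r, f (2 * c - r) = f r) :
    (PySem.List.pyRange 0 (2 * c + 1) 1).map f
      = (PySem.List.pyRange 0 (c + 1) 1).map f
          ++ (((PySem.List.pyRange 0 (c + 1) 1).map f).dropLast).reverse := by
  rw [PySem.List.pyRange_one_append 0 (c + 1) (2 * c + 1) (by omega) (by omega), List.map_append]
  congr 1
  rw [← List.map_dropLast, PySem.List.pyRange_one_succ_right (by omega : (0:Int) ≤ c),
    List.dropLast_concat]
  apply List.ext_getElem
  · simp [PySem.List.length_pyRange_one]
    omega
  · intro j h1 h2
    rw [List.getElem_map, PySem.List.getElem_pyRange_one, List.getElem_reverse, List.getElem_map,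
      PySem.List.getElem_pyRange_one]
    have hj : j < c.toNat := by
      simp [PySem.List.length_pyRange_one] at h1
      omega
    rw [← hsym (c + 1 + j)]
    congr 1
    simp [PySem.List.length_pyRange_one] at h2 ⊢
    omega

-- "".join(line + "\n" for line in L) = "\n".join(L) + "\n" on a nonempty L (on char lists)
theorem join_newline_chars :
    ∀ (x : List Char) (L : List (List Char)),
    PySem.Chars.join [] ((x :: L).map (fun l => l ++ ['\n']))
      = PySem.Chars.join ['\n'] (x :: L) ++ ['\n']
  | x, [] => by simp [PySem.Chars.join_singleton]
  | x, y :: L => by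
    have ih := join_newline_chars y L
    simp only [List.map_cons] at ih ⊢
    rw [PySem.Chars.join_cons_cons, PySem.Chars.join_cons_cons, ih]
    simp

-- ===== VERDICT (by name: the statement is the Claim_ definition above) =====
theorem banner_spec : Claim_equal_banner := by
  intro width _
  unfold Spec_banner banner banner_alt
  dsimp only
  have hm := PySem.Int.floordiv_mul_add_mod (max 7 width) 2
  have hm0 := PySem.Int.mod_nonneg (max 7 width) (by omega : (0:Int) < 2)
  have hm1 := PySem.Int.mod_lt (max 7 width) (by omega : (0:Int) < 2)
  set w0 : Int := max 7 width with hw0def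
  have hw07 : 7 ≤ w0 := le_max_left 7 width
  -- A's parity branch and B's arithmetic adjustment produce the same odd w
  have hwsame : (if PySem.Int.mod w0 2 == 0 then w0 + 1 else w0) = w0 + (1 - PySem.Int.mod w0 2) := by
    by_cases h : PySem.Int.mod w0 2 = 0
    · have hb : (PySem.Int.mod w0 2 == 0) = true := by rw [h]; rfl
      rw [if_pos hb, h]
      ring
    · have h1 : PySem.Int.mod w0 2 = 1 := by omega
      have hb : (PySem.Int.mod w0 2 == 0) = false := by rw [h1]; rfl
      rw [if_neg (by rw [hb]; decide), h1]
      ring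
  rw [hwsame]
  set w : Int := w0 + (1 - PySem.Int.mod w0 2) with hwdef
  have hw7 : 7 ≤ w := by omega
  have hC := PySem.Int.floordiv_mul_add_mod w 2
  have hC0 := PySem.Int.mod_nonneg w (by omega : (0:Int) < 2)
  have hC1 := PySem.Int.mod_lt w (by omega : (0:Int) < 2)
  set C : Int := PySem.Int.floordiv w 2 with hCdef
  have h2C : w = 2 * C + 1 := by omega
  have hCpos : 0 ≤ C := by omega
  -- A's rows-appending fold is a map; each scanned row is the arithmetic span
  rw [PySem.List.foldl_append_singleton_eq_map, List.nil_append]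
  rw [show bannerRowA w C = bannerSpan w C from funext (fun r => row_eq w C r h2C hCpos)]
  -- B's mirrored top half is the full list of rows
  rw [PySem.List.slice_to_neg_one]
  have hsym : ∀ r, bannerSpan w C (2 * C - r) = bannerSpan w C r := by
    intro r
    unfold bannerSpan
    rw [show (2 * C - r - C).natAbs = (r - C).natAbs from by omega]
  rw [show (PySem.List.pyRange 0 w 1).map (bannerSpan w C)
        = (PySem.List.pyRange 0 (2 * C + 1) 1).map (bannerSpan w C) from by rw [← h2C]]
  rw [rows_mirror C hCpos (bannerSpan w C) hsym]
  -- the final string assembly: "\n".join(L) + "\n" = "".join(l + "\n")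
  apply String.toList_inj.mp
  rw [String.toList_append, PySem.Str.toList_join, PySem.Str.toList_join, List.map_map]
  rw [show (String.toList ∘ fun line => line ++ "\n") = (fun l => l ++ ['\n']) ∘ String.toList from by
        funext l; simp [String.toList_append]]
  rw [← List.map_map]
  rw [show "".toList = ([] : List Char) from rfl, show "\n".toList = ['\n'] from rfl]
  simp only [List.cons_append, List.map_cons]
  exact (join_newline_chars _ _).symm
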